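-- pv_equiv track=rewrite | github.com/HitaloCesar/mc102 | lab16/lab16.py | pagsResposta
-- ===== SOURCE A (Python) =====
-- def pagsResposta(palavrasPagina, termosBusca):
--     ignore = False
--     for i in range(len(palavrasPagina) ):
--         palavrasPagina[i] = palavrasPagina[i].split()
--     lista = []
--
--     for i in range(len(palavrasPagina) ):
--         for j in range(len(termosBusca) ):
--             if termosBusca[j] not in palavrasPagina[i] :
--                 lista.append(0)
--                 ignore = True
--                 break
--         if ignore == False:
--             lista.append(1)
--         ignore = False
--
--
--     return lista
-- ===== SOURCE B (Python) =====
-- def pagsResposta(palavrasPagina, termosBusca):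
--     for i in range(len(palavrasPagina)):
--         palavrasPagina[i] = palavrasPagina[i].split()
--     index = {}
--     for i, words in enumerate(palavrasPagina):
--         for w in words:
--             index.setdefault(w, set()).add(i)
--     matching = set(range(len(palavrasPagina)))
--     for t in termosBusca:
--         matching &= index.get(t, set())
--     return [1 if i in matching else 0 for i in range(len(palavrasPagina))]
-- ===== Notes on version B (the rewrite author's own statement) =====
-- stated objective: alternative
-- what changed: Replaces the per-page scan over all search terms (with a break flag) by an inverted index word->set of page indices built in one pass, then intersects the index sets of the terms starting from the full page-index set and renders the 0/1 list from membership.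
import Mathlib
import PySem

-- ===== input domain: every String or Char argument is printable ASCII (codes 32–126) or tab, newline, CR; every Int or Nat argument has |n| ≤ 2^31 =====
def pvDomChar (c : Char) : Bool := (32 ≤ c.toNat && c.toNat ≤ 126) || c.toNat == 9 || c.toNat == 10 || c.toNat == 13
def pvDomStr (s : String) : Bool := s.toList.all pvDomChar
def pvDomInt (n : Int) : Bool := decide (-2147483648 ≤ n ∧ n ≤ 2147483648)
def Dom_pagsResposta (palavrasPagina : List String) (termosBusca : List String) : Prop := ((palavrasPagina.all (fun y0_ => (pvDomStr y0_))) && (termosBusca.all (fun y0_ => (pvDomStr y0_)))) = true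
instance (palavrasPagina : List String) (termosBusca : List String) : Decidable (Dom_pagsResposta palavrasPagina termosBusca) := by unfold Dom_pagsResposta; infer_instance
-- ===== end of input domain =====

-- B replaces A's per-page scan over all terms by an inverted index (word -> set of page
-- indices) intersected over the terms; equivalence is about the RETURN value only (both
-- Pythons mutate palavrasPagina in place by splitting each page into its word list).

-- ===== PORT A =====
-- inner 'for j in range(len(termosBusca))' loop with break: returns (lista, ignore)
def pagsRespostaInner (page : List String) (ts : List String) (lista : List Int) (ignore : Bool) : List Int × Bool :=
  match ts with
  | [] => (lista, ignore)
  | t :: rest =>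
    if ¬ (page.contains t) then (lista ++ [0], true)
    else pagsRespostaInner page rest lista ignore

-- body of the outer page loop: run the inner loop, append 1 if not ignored, reset ignore
def pagsRespostaStep (termosBusca : List String) (st : List Int × Bool) (page : List String) : List Int × Bool :=
  let r := pagsRespostaInner page termosBusca st.1 st.2
  let lista := if r.2 = false then r.1 ++ [1] else r.1
  (lista, false)

def pagsResposta (palavrasPagina : List String) (termosBusca : List String) : List Int :=
  -- first loop: palavrasPagina[i] = palavrasPagina[i].split()
  let pages := palavrasPagina.map (fun s => PySem.Str.split₀ s)
  -- second loop over pages, carrying (lista, ignore)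
  (pages.foldl (pagsRespostaStep termosBusca) ([], false)).1

-- ===== PORT B =====
-- index.setdefault(w, set()).add(i)  =  index[w] = index.get(w, set()) ∪ {i}  (exact: Dict.modify)
def pagsRespostaIndex (pages : List (List String)) : PySem.Dict String (PySem.Set Int) :=
  (PySem.List.enumerate pages 0).foldl (fun d p =>
    p.2.foldl (fun d w => d.modify w [] (fun s => PySem.Set.add s p.1)) d) PySem.Dict.empty

def pagsResposta_alt (palavrasPagina : List String) (termosBusca : List String) : List Int :=
  let pages := palavrasPagina.map (fun s => PySem.Str.split₀ s)
  let index := pagsRespostaIndex pages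
  let matching : PySem.Set Int := PySem.Set.ofList (PySem.List.pyRange 0 (pages.length) 1)
  let matching := termosBusca.foldl (fun m t => PySem.Set.inter m (index.getD t [])) matching
  (PySem.List.pyRange 0 (pages.length) 1).map (fun i => if matching.contains i then (1 : Int) else 0)

-- ===== PRECONDITION & SPEC =====
def Spec_pagsResposta (palavrasPagina : List String) (termosBusca : List String) (out : List Int) : Prop := out = pagsResposta_alt palavrasPagina termosBusca
instance (palavrasPagina : List String) (termosBusca : List String) (out : List Int) : Decidable (Spec_pagsResposta palavrasPagina termosBusca out) := by unfold Spec_pagsResposta; infer_instance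

-- ===== CLAIM (what is proved, stated in full; the proofs are below) =====
def Claim_equal_pagsResposta : Prop := ∀ (palavrasPagina : List String) (termosBusca : List String), Dom_pagsResposta palavrasPagina termosBusca → Spec_pagsResposta palavrasPagina termosBusca (pagsResposta palavrasPagina termosBusca)

-- ===== LEMMAS AND PROOFS =====

-- the common characterisation: page i gets 1 iff every term occurs in its word list
def pagsBit (tb : List String) (page : List String) : Int :=
  if tb.all (fun t => page.contains t) then 1 else 0

-- A side ------------------------------------------------------------------

theorem pagsRespostaInner_eq (page : List String) (ts : List String) (lista : List Int) (ignore : Bool) :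
    pagsRespostaInner page ts lista ignore =
      if ts.all (fun t => page.contains t) then (lista, ignore) else (lista ++ [0], true) := by
  induction ts with
  | nil => simp [pagsRespostaInner]
  | cons t rest ih =>
    by_cases h : t ∈ page <;> simp [pagsRespostaInner, ih, h]

theorem pagsResposta_foldl (tb : List String) (pages : List (List String)) (l : List Int) :
    pages.foldl (pagsRespostaStep tb) (l, false) = (l ++ pages.map (pagsBit tb), false) := by
  induction pages generalizing l with
  | nil => simp
  | cons page rest ih =>
    simp only [List.foldl_cons, List.map_cons, pagsRespostaStep]
    rw [pagsRespostaInner_eq]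
    by_cases h : (tb.all fun t => page.contains t) = true
    · rw [if_pos h]
      simp only [ih, pagsBit, if_pos h]
      simp
    · rw [if_neg h]
      simp only [ih, pagsBit, if_neg h]
      simp

theorem pagsResposta_eq (pp tb : List String) :
    pagsResposta pp tb = (pp.map (fun s => PySem.Str.split₀ s)).map (pagsBit tb) := by
  simp [pagsResposta, pagsResposta_foldl]

-- B side ------------------------------------------------------------------

-- inner word loop of the index builder: which indices end up under key w
theorem mem_getD_foldl_words (ws : List String) (d : PySem.Dict String (PySem.Set Int))
    (j : Int) (w : String) (i : Int) :
    i ∈ ((ws.foldl (fun d w' => d.modify w' [] (fun s => PySem.Set.add s j)) d).getD w []) ↔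
      i ∈ d.getD w [] ∨ (i = j ∧ w ∈ ws) := by
  induction ws generalizing d with
  | nil => simp
  | cons w0 rest ih =>
    simp only [List.foldl_cons]
    rw [ih, PySem.Dict.getD_modify]
    by_cases hw : w = w0
    · subst hw; simp [PySem.Set.mem_add]; tauto
    · simp [hw]

theorem mem_getD_index (l : List (Int × List String)) (d : PySem.Dict String (PySem.Set Int))
    (w : String) (i : Int) :
    i ∈ ((l.foldl (fun d p => p.2.foldl (fun d w' => d.modify w' [] (fun s => PySem.Set.add s p.1)) d) d).getD w []) ↔
      i ∈ d.getD w [] ∨ ∃ p ∈ l, p.1 = i ∧ w ∈ p.2 := by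
  induction l generalizing d with
  | nil => simp
  | cons p rest ih =>
    simp only [List.foldl_cons]
    rw [ih, mem_getD_foldl_words]
    constructor
    · rintro ((h | ⟨rfl, hw⟩) | h)
      · exact Or.inl h
      · exact Or.inr ⟨p, by simp, rfl, hw⟩
      · obtain ⟨q, hq, hqi, hqw⟩ := h
        exact Or.inr ⟨q, by simp [hq], hqi, hqw⟩
    · rintro (h | ⟨q, hq, hqi, hqw⟩)
      · exact Or.inl (Or.inl h)
      · rcases List.mem_cons.mp hq with rfl | hq'
        · exact Or.inl (Or.inr ⟨hqi.symm, hqw⟩)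
        · exact Or.inr ⟨q, hq', hqi, hqw⟩

theorem mem_index (pages : List (List String)) (w : String) (i : Int) :
    i ∈ (pagsRespostaIndex pages).getD w [] ↔
      ∃ k : Nat, ∃ h : k < pages.length, i = (k : Int) ∧ w ∈ pages[k] := by
  unfold pagsRespostaIndex
  rw [mem_getD_index]
  simp only [PySem.Dict.getD_empty, List.not_mem_nil, false_or]
  constructor
  · rintro ⟨p, hp, hpi, hpw⟩
    obtain ⟨k, hk, rfl⟩ := (PySem.List.mem_enumerate_iff pages 0 p).mp hp
    exact ⟨k, hk, by simpa using hpi.symm, hpw⟩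
  · rintro ⟨k, hk, rfl, hw⟩
    exact ⟨((k : Int), pages[k]), (PySem.List.mem_enumerate_iff pages 0 _).mpr ⟨k, hk, by simp⟩, rfl, hw⟩

theorem mem_matching_foldl (tb : List String) (idx : PySem.Dict String (PySem.Set Int))
    (m : PySem.Set Int) (i : Int) :
    i ∈ tb.foldl (fun m t => PySem.Set.inter m (idx.getD t [])) m ↔
      i ∈ m ∧ ∀ t ∈ tb, i ∈ idx.getD t [] := by
  induction tb generalizing m with
  | nil => simp
  | cons t rest ih =>
    simp only [List.foldl_cons]
    rw [ih]
    simp only [PySem.Set.mem_inter, List.mem_cons]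
    constructor
    · rintro ⟨⟨h1, h2⟩, h3⟩
      exact ⟨h1, fun u hu => by rcases hu with rfl | hu; exact h2; exact h3 u hu⟩
    · rintro ⟨h1, h2⟩
      exact ⟨⟨h1, h2 t (Or.inl rfl)⟩, fun u hu => h2 u (Or.inr hu)⟩

theorem pagsResposta_alt_eq (pp tb : List String) :
    pagsResposta_alt pp tb = (pp.map (fun s => PySem.Str.split₀ s)).map (pagsBit tb) := by
  unfold pagsResposta_alt
  set pages := pp.map (fun s => PySem.Str.split₀ s) with hpages
  apply List.ext_getElem
  · simp [PySem.List.length_pyRange_one]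
  · intro k hk1 hk2
    have hklen : k < pages.length := by simpa using hk2
    simp only [List.getElem_map, PySem.List.getElem_pyRange_one, PySem.Set.contains_iff]
    split_ifs with hmem
    · obtain ⟨-, h2⟩ := (mem_matching_foldl tb _ _ _).mp hmem
      have hall : (tb.all fun t => pages[k].contains t) = true := by
        rw [List.all_eq_true]
        intro t ht
        obtain ⟨k', hk', hkk, hw⟩ := (mem_index pages t _).mp (h2 t ht)
        have : k' = k := by omega
        subst this
        simpa using hw
      simp only [pagsBit, if_pos hall]
    · have hnall : ¬ (tb.all fun t => pages[k].contains t) = true := by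
        intro hall
        apply hmem
        rw [mem_matching_foldl]
        refine ⟨?_, ?_⟩
        · simp only [PySem.Set.mem_ofList, PySem.List.mem_pyRange_one]
          refine ⟨by omega, by omega⟩
        · intro t ht
          rw [mem_index]
          exact ⟨k, hklen, by omega, by simpa using (List.all_eq_true.mp hall) t ht⟩
      simp only [pagsBit, if_neg hnall]

-- ===== VERDICT (by name: the statement is the Claim_ definition above) =====
theorem pagsResposta_spec : Claim_equal_pagsResposta := by
  intro pp tb _
  show pagsResposta pp tb = pagsResposta_alt pp tb
  rw [pagsResposta_eq, pagsResposta_alt_eq]
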